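-- pv_equiv track=rewrite | github.com/jcrodmir/codember_2024 | Reto_02_Comprobar_Contraseñas/reto02_v1.py | comprobar_digito_tras_letra
-- ===== SOURCE A (Python) =====
-- def comprobar_digito_tras_letra(palabra):
--     letra=""
--     for caracter in palabra:
--         if(not caracter.isdigit() and ord(caracter)>=97 and ord(caracter)<=122):
--             letra=caracter
--         elif(letra != "" and caracter.isdigit()):
--             return False
--     return True
-- ===== SOURCE B (Python) =====
-- def comprobar_digito_tras_letra(palabra):
--     idx = next((i for i, c in enumerate(palabra) if 'a' <= c <= 'z'), None)
--     if idx is None: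
--         return True
--     return not any(c.isdigit() for c in palabra[idx + 1:])
-- ===== Notes on version B (the rewrite author's own statement) =====
-- stated objective: simpler
-- what changed: Replaced A's single flag-carrying per-character scan by a locate-then-scan decomposition: find the index of the first lowercase letter, then check the strict suffix for digits with not-any.
import Mathlib
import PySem

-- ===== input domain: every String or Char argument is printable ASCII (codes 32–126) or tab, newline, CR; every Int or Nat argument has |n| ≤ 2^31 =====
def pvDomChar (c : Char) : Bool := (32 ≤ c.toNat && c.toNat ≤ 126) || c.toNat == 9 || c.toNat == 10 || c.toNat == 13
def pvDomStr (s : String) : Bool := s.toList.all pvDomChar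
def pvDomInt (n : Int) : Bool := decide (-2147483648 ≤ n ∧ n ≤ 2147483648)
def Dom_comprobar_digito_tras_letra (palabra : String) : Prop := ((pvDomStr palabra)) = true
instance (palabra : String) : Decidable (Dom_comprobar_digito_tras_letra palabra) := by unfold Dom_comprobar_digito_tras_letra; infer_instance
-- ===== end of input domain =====

-- Header: B replaces A's flag-carrying single scan by a locate-first-lowercase-then-scan-suffix decomposition (objective: simpler).

-- ===== PORT A =====
-- A's for-loop with early return, carrying the 'letra' string state ("" ↔ []).
def pvALoop : List Char → List Char → Bool
  | [], _ => true
  | c :: rest, letra =>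
    if !PySem.Chars.isdigit c && decide (97 ≤ c.toNat) && decide (c.toNat ≤ 122) then
      pvALoop rest [c]
    else if decide (letra ≠ []) && PySem.Chars.isdigit c then
      false
    else
      pvALoop rest letra

def comprobar_digito_tras_letra (palabra : String) : Bool :=
  pvALoop palabra.toList []

-- ===== PORT B =====
def comprobar_digito_tras_letra_alt (palabra : String) : Bool :=
  match palabra.toList.findIdx? (fun c => decide ('a' ≤ c) && decide (c ≤ 'z')) with
  | none => true
  | some i => !((palabra.toList.drop (i + 1)).any PySem.Chars.isdigit)

-- ===== PRECONDITION & SPEC =====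
def Spec_comprobar_digito_tras_letra (palabra : String) (out : Bool) : Prop := out = comprobar_digito_tras_letra_alt palabra
instance (palabra : String) (out : Bool) : Decidable (Spec_comprobar_digito_tras_letra palabra out) := by unfold Spec_comprobar_digito_tras_letra; infer_instance

-- ===== CLAIM (what is proved, stated in full; the proofs are below) =====
def Claim_equal_comprobar_digito_tras_letra : Prop := ∀ (palabra : String), Dom_comprobar_digito_tras_letra palabra → Spec_comprobar_digito_tras_letra palabra (comprobar_digito_tras_letra palabra)

-- ===== LEMMAS AND PROOFS =====

-- the list-level form of B
def pvBList (l : List Char) : Bool :=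
  match l.findIdx? (fun c => decide ('a' ≤ c) && decide (c ≤ 'z')) with
  | none => true
  | some i => !((l.drop (i + 1)).any PySem.Chars.isdigit)

theorem pvAlt_eq (palabra : String) :
    comprobar_digito_tras_letra_alt palabra = pvBList palabra.toList := rfl

theorem isdigit_of_lower {c : Char} (h : 97 ≤ c.toNat ∧ c.toNat ≤ 122) :
    PySem.Chars.isdigit c = false := by
  simp only [PySem.Chars.isdigit, Char.le_def, UInt32.le_iff_toNat_le, Char.toNat_val]
  simp
  omega

theorem lower_iff (c : Char) : ('a' ≤ c ∧ c ≤ 'z') ↔ (97 ≤ c.toNat ∧ c.toNat ≤ 122) := by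
  simp only [Char.le_def, UInt32.le_iff_toNat_le, Char.toNat_val]
  exact Iff.rfl

-- once a lowercase letter has been seen, A just looks for any digit in the rest
theorem pvALoop_ne_nil (l : List Char) (letra : List Char) (h : letra ≠ []) :
    pvALoop l letra = !(l.any PySem.Chars.isdigit) := by
  induction l generalizing letra with
  | nil => simp [pvALoop]
  | cons c rest ih =>
    simp only [pvALoop, List.any_cons]
    by_cases hl : (97 ≤ c.toNat ∧ c.toNat ≤ 122)
    · have hd := isdigit_of_lower hl
      simp [hd, hl.1, hl.2, ih [c] (by simp)]
    · by_cases hd : PySem.Chars.isdigit c = true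
      · simp [hd, h]
      · simp only [Bool.not_eq_true] at hd
        rcases (not_and_or.mp hl) with h1 | h1 <;> simp [hd, h1, ih letra h]

theorem pvALoop_nil_eq (l : List Char) : pvALoop l [] = pvBList l := by
  induction l with
  | nil => simp [pvALoop, pvBList]
  | cons c rest ih =>
    by_cases hl : ('a' ≤ c ∧ c ≤ 'z')
    · have hn := (lower_iff c).mp hl
      have hd := isdigit_of_lower hn
      simp [pvALoop, pvBList, List.findIdx?_cons, hd, hl.1, hl.2, hn.1, hn.2,
        pvALoop_ne_nil rest [c] (by simp)]
    · have hn : ¬ (97 ≤ c.toNat ∧ c.toNat ≤ 122) := fun hx => hl ((lower_iff c).mpr hx)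
      have hA : pvALoop (c :: rest) [] = pvALoop rest [] := by
        simp only [pvALoop]
        rcases (not_and_or.mp hn) with h1 | h1 <;> simp [h1]
      have hB : pvBList (c :: rest) = pvBList rest := by
        simp only [pvBList, List.findIdx?_cons]
        rcases (not_and_or.mp hl) with h1 | h1 <;> simp [h1] <;>
          cases rest.findIdx? (fun c => decide ('a' ≤ c) && decide (c ≤ 'z')) <;> simp
      rw [hA, hB, ih]

-- ===== VERDICT (by name: the statement is the Claim_ definition above) =====
theorem comprobar_digito_tras_letra_spec : Claim_equal_comprobar_digito_tras_letra := by
  intro palabra _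
  unfold Spec_comprobar_digito_tras_letra
  rw [pvAlt_eq]
  exact pvALoop_nil_eq palabra.toList
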